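-- pv_equiv track=rewrite | github.com/brianSalk/letter-boxed-solver | word_tools.py | get_best_words
-- ===== SOURCE A (Python) =====
-- def get_best_words(words):
--     m = 0
--     best_words = []
--     for word in words:
--         if len(set(word)) > m:
--             m = len(set(word))
--             best_words = [word]
--         elif len(set(word)) == m:
--             best_words.append(word)
--     return best_words
-- ===== SOURCE B (Python) =====
-- def get_best_words(words):
--     best = max((len(set(w)) for w in words), default=0)
--     return [w for w in words if len(set(w)) == best]
-- ===== Notes on version B (the rewrite author's own statement) =====
-- stated objective: simpler
-- what changed: Replaces A's single-pass running-max with list resets by a max-reduce over distinct-letter counts followed by one order-preserving filter pass.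
import Mathlib
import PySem

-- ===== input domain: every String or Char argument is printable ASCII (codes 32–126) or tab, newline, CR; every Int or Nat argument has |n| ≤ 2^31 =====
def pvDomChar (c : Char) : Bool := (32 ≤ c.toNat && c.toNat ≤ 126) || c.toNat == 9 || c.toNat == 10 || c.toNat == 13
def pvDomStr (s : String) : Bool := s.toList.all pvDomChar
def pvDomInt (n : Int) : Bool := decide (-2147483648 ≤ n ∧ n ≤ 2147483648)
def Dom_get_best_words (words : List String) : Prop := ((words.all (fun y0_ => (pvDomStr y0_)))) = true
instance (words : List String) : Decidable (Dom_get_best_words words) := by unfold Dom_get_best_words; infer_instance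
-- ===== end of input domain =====

-- ===== PORT A =====
-- B replaces A's single-pass running-max-with-reset by a max-reduce plus one order-preserving filter pass (simpler decomposition, same cost).
def get_best_words (words : List String) : List String :=
  (words.foldl (fun (st : Nat × List String) w =>
      let k := (PySem.Set.ofList w.toList).length
      if k > st.1 then (k, [w])
      else if k = st.1 then (st.1, st.2 ++ [w])
      else st) (0, [])).2

-- ===== PORT B =====
def get_best_words_alt (words : List String) : List String :=
  let best := words.foldl (fun a w => max a (PySem.Set.ofList w.toList).length) 0
  words.filter (fun w => (PySem.Set.ofList w.toList).length == best)

-- ===== PRECONDITION & SPEC =====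
def Spec_get_best_words (words : List String) (out : List String) : Prop := out = get_best_words_alt words
instance (words : List String) (out : List String) : Decidable (Spec_get_best_words words out) := by unfold Spec_get_best_words; infer_instance

-- ===== CLAIM (what is proved, stated in full; the proofs are below) =====
def Claim_equal_get_best_words : Prop := ∀ (words : List String), Dom_get_best_words words → Spec_get_best_words words (get_best_words words)

-- ===== LEMMAS AND PROOFS =====
lemma pv_le_foldl_max (key : String → Nat) (ws : List String) (m : Nat) :
    m ≤ ws.foldl (fun a w => max a (key w)) m := by
  induction ws generalizing m with
  | nil => simp
  | cons w ws ih => exact le_trans (le_max_left _ _) (ih _)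

lemma pv_loop_eq (key : String → Nat) (ws : List String) (m : Nat) (bw : List String) :
    ws.foldl (fun (st : Nat × List String) w =>
      if key w > st.1 then (key w, [w])
      else if key w = st.1 then (st.1, st.2 ++ [w])
      else st) (m, bw)
    = (ws.foldl (fun a w => max a (key w)) m,
       (if ws.foldl (fun a w => max a (key w)) m = m then bw else [])
         ++ ws.filter (fun w => key w == ws.foldl (fun a w => max a (key w)) m)) := by
  induction ws generalizing m bw with
  | nil => simp
  | cons w ws ih =>
    simp only [List.foldl_cons]
    rcases lt_trichotomy m (key w) with h | h | h
    · rw [if_pos (by omega : key w > m), ih]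
      have hm : max m (key w) = key w := max_eq_right h.le
      simp only [hm]
      have hM := pv_le_foldl_max key ws (key w)
      have hMm : ¬ ws.foldl (fun a w => max a (key w)) (key w) = m := by omega
      simp only [List.filter_cons, if_neg hMm, beq_iff_eq]
      by_cases hw : key w = ws.foldl (fun a w => max a (key w)) (key w)
      · rw [if_pos hw.symm, if_pos hw]; simp
      · rw [if_neg (fun e => hw e.symm), if_neg hw]
    · rw [if_neg (by omega : ¬ key w > m), if_pos h.symm, ih]
      have hm : max m (key w) = m := by omega
      simp only [hm, List.filter_cons, beq_iff_eq]
      by_cases hM : ws.foldl (fun a w => max a (key w)) m = m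
      · simp only [if_pos hM, if_pos (by omega : key w = ws.foldl (fun a w => max a (key w)) m)]
        simp
      · simp only [if_neg hM, if_neg (by omega : ¬ key w = ws.foldl (fun a w => max a (key w)) m)]
    · rw [if_neg (by omega : ¬ key w > m), if_neg (by omega : ¬ key w = m), ih]
      have hm : max m (key w) = m := by omega
      have hM := pv_le_foldl_max key ws m
      simp only [hm, List.filter_cons, beq_iff_eq,
        if_neg (by omega : ¬ key w = ws.foldl (fun a w => max a (key w)) m)]

-- ===== VERDICT (by name: the statement is the Claim_ definition above) =====
theorem get_best_words_spec : Claim_equal_get_best_words := by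
  intro words _
  unfold Spec_get_best_words get_best_words get_best_words_alt
  rw [show (fun (st : Nat × List String) w =>
      let k := (PySem.Set.ofList w.toList).length
      if k > st.1 then (k, [w])
      else if k = st.1 then (st.1, st.2 ++ [w])
      else st) = (fun (st : Nat × List String) w =>
      if (fun w => (PySem.Set.ofList w.toList).length) w > st.1 then ((fun w => (PySem.Set.ofList w.toList).length) w, [w])
      else if (fun w => (PySem.Set.ofList w.toList).length) w = st.1 then (st.1, st.2 ++ [w])
      else st) from rfl]
  rw [pv_loop_eq (fun w => (PySem.Set.ofList w.toList).length)]
  simp
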